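-- pv_equiv track=rewrite | github.com/luca-waldvogel/arithmetic-formatter | arithmetic_formatter.py | find_operators
-- ===== SOURCE A (Python) =====
-- def find_operators(problems):
--     operators = []
--     for problem in problems:
--         operator = ''
--         for char in problem:
--             if char in '+-*/':
--                 operator += char
--                 operators.append(operator)
--     return operators
-- ===== SOURCE B (Python) =====
-- def find_operators(problems):
--     out = []
--     for problem in problems:
--         s = ''.join(c for c in problem if c in '+-*/')
--         out.extend(s[:i + 1] for i in range(len(s)))
--     return out
-- ===== Notes on version B (the rewrite author's own statement) =====
-- stated objective: idiomatic
-- what changed: Per problem, B first filters the operator characters into a string and then emits all of its nonempty prefixes (slices over a range), replacing A's inline running-accumulator that appends the growing string at each operator found.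
import Mathlib
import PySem

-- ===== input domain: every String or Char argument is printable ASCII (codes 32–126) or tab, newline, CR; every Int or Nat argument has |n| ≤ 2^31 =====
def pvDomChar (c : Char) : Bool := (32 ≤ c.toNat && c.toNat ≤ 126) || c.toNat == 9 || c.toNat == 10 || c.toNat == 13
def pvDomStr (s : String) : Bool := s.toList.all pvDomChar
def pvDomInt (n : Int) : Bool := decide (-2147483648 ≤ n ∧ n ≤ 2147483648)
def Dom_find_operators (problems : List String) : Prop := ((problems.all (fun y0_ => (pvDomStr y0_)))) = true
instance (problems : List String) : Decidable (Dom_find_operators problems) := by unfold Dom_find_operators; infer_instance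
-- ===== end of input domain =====

-- B: per problem, filter the operator chars then emit all nonempty prefixes (two-stage), vs A's inline running accumulator; same cost, more idiomatic.
-- shared helper: the Python membership test `c in '+-*/'`, used verbatim by both sources
def pvIsOp (c : Char) : Bool := "+-*/".toList.contains c

-- ===== PORT A =====
-- A's running 'operator' string is kept as a List Char; String.ofList renders it at each append (exact: Python str concat).
def find_operators (problems : List String) : List String :=
  problems.foldl (fun operators problem =>
    (problem.toList.foldl (fun (st : List Char × List String) char =>
      if pvIsOp char then
        let op := st.1 ++ [char]
        (op, st.2 ++ [String.ofList op])
      else st) ([], operators)).2) []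

-- ===== PORT B =====
def find_operators_alt (problems : List String) : List String :=
  problems.foldl (fun out problem =>
    let s := problem.toList.filter (fun c => pvIsOp c)
    out ++ ((List.range s.length).map (fun i => String.ofList (s.take (i + 1))))) []

-- ===== PRECONDITION & SPEC =====
def Spec_find_operators (problems : List String) (out : List String) : Prop := out = find_operators_alt problems
instance (problems : List String) (out : List String) : Decidable (Spec_find_operators problems out) := by unfold Spec_find_operators; infer_instance

-- ===== CLAIM (what is proved, stated in full; the proofs are below) =====
def Claim_equal_find_operators : Prop := ∀ (problems : List String), Dom_find_operators problems → Spec_find_operators problems (find_operators problems)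

-- ===== LEMMAS AND PROOFS =====
-- cumulative operator strings emitted by A's inner loop, starting from accumulator acc
def pvCum (acc : List Char) : List Char → List String
  | [] => []
  | c :: rest =>
    if pvIsOp c then String.ofList (acc ++ [c]) :: pvCum (acc ++ [c]) rest
    else pvCum acc rest

theorem pv_inner (l : List Char) : ∀ (acc : List Char) (ops : List String),
    l.foldl (fun (st : List Char × List String) char =>
      if pvIsOp char then
        let op := st.1 ++ [char]
        (op, st.2 ++ [String.ofList op])
      else st) (acc, ops)
    = (acc ++ l.filter (fun c => pvIsOp c), ops ++ pvCum acc l) := by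
  induction l with
  | nil => intro acc ops; simp [pvCum]
  | cons c rest ih =>
    intro acc ops
    by_cases h : pvIsOp c
    · simp only [List.foldl_cons, h, if_true]
      rw [ih]
      simp [pvCum, h]
    · simp only [List.foldl_cons, h, if_false, Bool.false_eq_true]
      rw [ih]
      simp [pvCum, h]

theorem pv_cum_eq (l : List Char) : ∀ (acc : List Char),
    pvCum acc l = (List.range (l.filter (fun c => pvIsOp c)).length).map
      (fun i => String.ofList (acc ++ (l.filter (fun c => pvIsOp c)).take (i + 1))) := by
  induction l with
  | nil => intro acc; simp [pvCum]
  | cons c rest ih =>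
    intro acc
    by_cases h : pvIsOp c
    · simp [pvCum, h, List.range_succ_eq_map, ih, List.map_map,
        Function.comp, List.take_succ_cons]
    · simp [pvCum, h, ih]

theorem pv_eq (problems : List String) : find_operators problems = find_operators_alt problems := by
  unfold find_operators find_operators_alt
  induction problems using List.reverseRecOn with
  | nil => rfl
  | append_singleton ps p ih =>
    simp only [List.foldl_append, List.foldl_cons, List.foldl_nil]
    rw [ih, pv_inner, pv_cum_eq]
    simp

-- ===== VERDICT (by name: the statement is the Claim_ definition above) =====
theorem find_operators_spec : Claim_equal_find_operators := by
  intro problems _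
  exact pv_eq problems
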